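-- pv_equiv track=rewrite | github.com/Duckyyy2610/Lttt | FITSP23B21DCCN236CNDHW0103/FITSP23B21DCCN236CNDHW0103.py | is_linear_block_code
-- ===== SOURCE A (Python) =====
-- import collections
--
-- def is_uniform_code(codes):
--     x = len(codes[0])
--     for code in codes:
--         if len(code) != x:
--             return False
--     return True
--
-- def is_linear_block_code(codes):
--     if not is_uniform_code(codes):
--         return False
--     check = 0
--     for i in range(len(codes)):
--         counter = collections.Counter(codes[i])
--         if counter['0'] and not counter['1']:
--             check = 1
--     if not check:
--         return False
--     codeset = set(codes)
--     for code_1 in codes: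
--         for code_2 in codes:
--             if code_1 != code_2:
--                 code = ""
--                 for i in range(len(code_1)):
--                     code += str(int(code_1[i])^int(code_2[i]))
--                 if code not in codeset:
--                     return False
--     return True
-- ===== SOURCE B (Python) =====
-- def is_linear_block_code(codes):
--     # A binary block code is linear iff it is uniform, contains the zero word,
--     # and is a GF(2) subspace; a set S containing 0 is a subspace iff the span
--     # built by doubling (xor-basis growth) is S itself, i.e. len(span)==len(S).
--     words = set(codes)
--     lengths = {len(c) for c in codes}
--     if len(lengths) != 1:
--         return False
--     L = lengths.pop()
--     if L == 0 or "0" * L not in words: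
--         return False
--     vecs = {int(c, 2) for c in words}
--     span = {0}
--     for v in vecs:
--         if v not in span:
--             if 2 * len(span) > len(vecs):
--                 return False
--             span |= {v ^ s for s in span}
--     return len(span) == len(vecs)
-- ===== Notes on version B (the rewrite author's own statement) =====
-- stated objective: faster
-- what changed: Instead of testing all O(n^2) pairs with character-by-character string xor, B parses the codewords to integers and grows a GF(2) xor-span by doubling (with an early size cap), deciding linearity by |span| == |codeset|.
-- outside the precondition, e.g. on is_linear_block_code(['03', '00', '05', 'aa']): A returns False, B raises ValueError; on is_linear_block_code(['07']): A returns True, B returns False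
import Mathlib
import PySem

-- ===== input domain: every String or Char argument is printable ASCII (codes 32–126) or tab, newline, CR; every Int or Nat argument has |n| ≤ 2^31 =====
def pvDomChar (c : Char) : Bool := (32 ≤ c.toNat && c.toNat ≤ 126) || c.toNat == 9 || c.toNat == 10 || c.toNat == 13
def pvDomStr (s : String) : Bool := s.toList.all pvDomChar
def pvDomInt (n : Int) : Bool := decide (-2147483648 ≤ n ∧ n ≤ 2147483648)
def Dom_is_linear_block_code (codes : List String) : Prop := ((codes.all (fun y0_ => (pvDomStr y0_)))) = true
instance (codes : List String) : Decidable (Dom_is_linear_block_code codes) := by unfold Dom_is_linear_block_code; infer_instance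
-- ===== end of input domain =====

-- B replaces A's O(n^2)-pair string-xor closure test by parsing the codewords to integers and
-- growing a GF(2) xor-span by doubling, deciding linearity as |span| = |distinct codewords|.


-- ===== PORT A =====
-- x = len(codes[0]); early-return-False loop over codes (codes = [] raises IndexError: excluded by Pre_)
def is_uniform_code (codes : List String) : Bool :=
  let x := PySem.Str.len ((PySem.List.pyGet? codes 0).getD "")
  codes.all (fun code => PySem.Str.len code == x)

-- int(s); Python's ValueError is `none`, only ever reached where Pre_ guarantees a digit
def pyInt (s : String) : Int := (PySem.Int.ofStr? s).getD 0

-- code[i], the 1-character string Python indexing yields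
def pyCharAt (s : String) (i : Int) : String :=
  match PySem.Str.pyGet? s i with
  | some c => String.ofList [c]
  | none => ""

-- code = ""; for i in range(len(code_1)): code += str(int(code_1[i]) ^ int(code_2[i]))
def xorWord (c1 c2 : String) : String :=
  (PySem.List.pyRange 0 (PySem.Str.len c1)).foldl
    (fun code i =>
      code ++ PySem.Int.toStr (PySem.Int.bxor (pyInt (pyCharAt c1 i)) (pyInt (pyCharAt c2 i)))) ""

def is_linear_block_code (codes : List String) : Bool :=
  if !(is_uniform_code codes) then false
  else
    -- Counter(codes[i]) counted over characters (Python keys the 1-char strings; same counts)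
    let check := (PySem.List.pyRange 0 (PySem.List.len codes)).foldl
      (fun check i =>
        let counter := PySem.Dict.counter ((PySem.List.pyGetD codes i "").toList)
        if counter.getD '0' 0 ≠ 0 ∧ counter.getD '1' 0 = 0 then 1 else check) (0 : Int)
    if check = 0 then false
    else
      let codeset := PySem.Set.ofList codes
      -- two nested loops whose only effect is an early `return False` = all
      codes.all (fun c1 => codes.all (fun c2 =>
        if c1 ≠ c2 then codeset.contains (xorWord c1 c2) else true))

-- ===== PORT B =====
-- int(c, 2): exact on the nonempty '0'/'1'-strings it is reached on under Pre_
def parseBin (s : String) : Nat :=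
  s.toList.foldl (fun a c => 2 * a + (if c = '1' then 1 else 0)) 0

-- the span-doubling loop; Python's early `return False` becomes `none`
def spanLoop (nvecs : Nat) : List Nat → PySem.Set Nat → Option (PySem.Set Nat)
  | [], span => some span
  | v :: rest, span =>
    if span.contains v then spanLoop nvecs rest span
    else if 2 * span.length > nvecs then none
    else spanLoop nvecs rest (PySem.Set.union span (span.map (fun s => v ^^^ s)))

def is_linear_block_code_alt (codes : List String) : Bool :=
  let words : PySem.Set String := PySem.Set.ofList codes
  -- {len(c) for c in codes}; Python's len is the (nonnegative) character count
  let lengths : PySem.Set Nat := PySem.Set.ofList (codes.map (fun c => c.toList.length))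
  if lengths.length ≠ 1 then false
  else
    let L := lengths.headD 0    -- .pop() of a singleton set
    if L == 0 || !(words.contains (String.ofList (List.replicate L '0'))) then false
    else
      let vecs : PySem.Set Nat := PySem.Set.ofList (words.map parseBin)
      match spanLoop vecs.length vecs (PySem.Set.ofList [0]) with
      | none => false
      | some span => span.length == vecs.length

-- ===== PRECONDITION & SPEC =====
-- Pre_ admits every nonempty list that is all-binary, or that A rejects before its int() loop
-- (non-uniform lengths, or no word of '0's free of '1's); it excludes the remaining inputs, where
-- A's xor loop either raises ValueError on a non-digit character or returns values that depend on
-- reading non-binary decimal digits as GF(2) symbols (e.g. A returns True on ["07"]).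
def Pre_is_linear_block_code (codes : List String) : Prop :=
  codes ≠ [] ∧
  ((codes.all (fun c => c.toList.all (fun ch => ch == '0' || ch == '1'))) = true
   ∨ (codes.any (fun c => c.toList.length != (codes.headD "").toList.length)) = true
   ∨ (codes.all (fun c => !(c.toList.contains '0' && !(c.toList.contains '1')))) = true)
instance (codes : List String) : Decidable (Pre_is_linear_block_code codes) := by
  unfold Pre_is_linear_block_code; infer_instance

def pvWitness_is_linear_block_code : List String := ["0"]

def Spec_is_linear_block_code (codes : List String) (out : Bool) : Prop := out = is_linear_block_code_alt codes
instance (codes : List String) (out : Bool) : Decidable (Spec_is_linear_block_code codes out) := by unfold Spec_is_linear_block_code; infer_instance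

-- ===== CLAIM (what is proved, stated in full; the proofs are below) =====
def Claim_equal_is_linear_block_code : Prop := ∀ (codes : List String), Dom_is_linear_block_code codes → Pre_is_linear_block_code codes → Spec_is_linear_block_code codes (is_linear_block_code codes)

-- ===== LEMMAS AND PROOFS =====

-- ---------- bit arithmetic for parseBin ----------

def pbl (l : List Char) : Nat := l.foldl (fun a c => 2 * a + (if c = '1' then 1 else 0)) 0
def xc (a b : Char) : Char := if a = b then '0' else '1'

theorem parseBin_eq_pbl (s : String) : parseBin s = pbl s.toList := rfl

theorem pbl_acc (l : List Char) : ∀ a : Nat,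
    l.foldl (fun a c => 2 * a + (if c = '1' then 1 else 0)) a = a * 2 ^ l.length + pbl l := by
  induction l with
  | nil => intro a; simp [pbl]
  | cons c t ih =>
    intro a
    have h1 := ih (2 * a + (if c = '1' then 1 else 0))
    have h2 := ih (2 * 0 + (if c = '1' then 1 else 0))
    simp only [List.foldl_cons, pbl] at *
    rw [h1, h2]
    simp only [List.length_cons, pow_succ]
    ring

theorem pbl_cons (c : Char) (l : List Char) :
    pbl (c :: l) = (if c = '1' then 1 else 0) * 2 ^ l.length + pbl l := by
  have := pbl_acc l (2 * 0 + (if c = '1' then 1 else 0))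
  simp only [pbl, List.foldl_cons] at *
  rw [this]; ring

theorem pbl_append_singleton (l : List Char) (c : Char) :
    pbl (l ++ [c]) = 2 * pbl l + (if c = '1' then 1 else 0) := by
  simp [pbl, List.foldl_append]

theorem pbl_lt (l : List Char) (h : ∀ ch ∈ l, ch = '0' ∨ ch = '1') :
    pbl l < 2 ^ l.length := by
  induction l with
  | nil => simp [pbl]
  | cons c t ih =>
    have ht := ih (fun ch hm => h ch (List.mem_cons_of_mem _ hm))
    rw [pbl_cons]
    have hb : (if c = '1' then (1:Nat) else 0) ≤ 1 := by split <;> omega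
    simp only [List.length_cons, pow_succ]
    nlinarith [ht, hb]

theorem pbl_replicate (n : Nat) : pbl (List.replicate n '0') = 0 := by
  induction n with
  | zero => rfl
  | succ k ih =>
    rw [List.replicate_succ, pbl_cons, ih]
    simp

theorem xor_two_mul_add (a c b d : Nat) (hb : b ≤ 1) (hd : d ≤ 1) :
    (2 * a + b) ^^^ (2 * c + d) = 2 * (a ^^^ c) + (b ^^^ d) := by
  have key : ∀ (x y : Bool), (2 * a + x.toNat) ^^^ (2 * c + y.toNat) = 2 * (a ^^^ c) + (x != y).toNat := by
    intro x y
    have := Nat.xor_bit x a y c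
    simpa [Nat.bit_val] using this
  interval_cases b <;> interval_cases d
  · simpa using key false false
  · simpa using key false true
  · simpa using key true false
  · simpa using key true true

theorem pbl_zip (l1 : List Char) : ∀ l2 : List Char, l1.length = l2.length →
    (∀ ch ∈ l1, ch = '0' ∨ ch = '1') → (∀ ch ∈ l2, ch = '0' ∨ ch = '1') →
    pbl (List.zipWith xc l1 l2) = pbl l1 ^^^ pbl l2 := by
  induction l1 using List.reverseRecOn with
  | nil =>
    intro l2 h _ _
    have : l2 = [] := by cases l2 <;> simp_all
    simp [this, pbl]
  | append_singleton l a ih =>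
    intro l2 h hb1 hb2
    rcases l2.eq_nil_or_concat with rfl | ⟨l2', b, rfl⟩
    · simp at h
    · simp only [List.concat_eq_append] at *
      have hlen : l.length = l2'.length := by simp at h; omega
      rw [List.zipWith_append hlen]
      simp only [List.zipWith_cons_cons, List.zipWith_nil_right]
      rw [pbl_append_singleton, pbl_append_singleton, pbl_append_singleton]
      rw [ih l2' hlen (fun ch hm => hb1 ch (by simp [hm])) (fun ch hm => hb2 ch (by simp [hm]))]
      have ha : a = '0' ∨ a = '1' := hb1 a (by simp)
      have hbb : b = '0' ∨ b = '1' := hb2 b (by simp)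
      rw [xor_two_mul_add _ _ _ _ (by split <;> omega) (by split <;> omega)]
      rcases ha with rfl | rfl <;> rcases hbb with rfl | rfl <;> simp [xc]

theorem pbl_inj (l1 : List Char) : ∀ l2 : List Char, l1.length = l2.length →
    (∀ ch ∈ l1, ch = '0' ∨ ch = '1') → (∀ ch ∈ l2, ch = '0' ∨ ch = '1') →
    pbl l1 = pbl l2 → l1 = l2 := by
  induction l1 with
  | nil => intro l2 h _ _ _; cases l2 <;> simp_all
  | cons c t ih =>
    intro l2 h hb1 hb2 hp
    cases l2 with
    | nil => simp at h
    | cons d t2 =>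
      have hlen : t.length = t2.length := by simpa using h
      have h1 := pbl_lt t (fun ch hm => hb1 ch (by simp [hm]))
      have h2 := pbl_lt t2 (fun ch hm => hb2 ch (by simp [hm]))
      rw [pbl_cons, pbl_cons, hlen] at hp
      have hc : c = '0' ∨ c = '1' := hb1 c (by simp)
      have hd : d = '0' ∨ d = '1' := hb2 d (by simp)
      have hcd : c = d ∧ pbl t = pbl t2 := by
        rcases hc with rfl | rfl <;> rcases hd with rfl | rfl <;>
          simp_all <;> omega
      rw [hcd.1, ih t2 hlen (fun ch hm => hb1 ch (by simp [hm])) (fun ch hm => hb2 ch (by simp [hm])) hcd.2]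

-- ---------- A's inner xor loop ----------

theorem loop_toList (f : Int → String) : ∀ (n : Nat) (s : String),
    ((PySem.List.pyRange 0 (n : Int)).foldl (fun code i => code ++ f i) s).toList
      = s.toList ++ ((List.range n).map (fun (k : Nat) => (f (k : Int)).toList)).flatten := by
  intro n
  induction n with
  | zero => intro s; simp [PySem.List.pyRange]
  | succ m ih =>
    intro s
    have hcast : ((m + 1 : Nat) : Int) = (m : Int) + 1 := by push_cast; ring
    rw [hcast, PySem.List.pyRange_one_succ_right (by positivity), List.foldl_append]
    simp only [List.foldl_cons, List.foldl_nil]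
    rw [List.range_succ]
    simp [ih s]

theorem charAt_eval (c1 : String) (k : Nat) (hk : k < c1.toList.length) :
    pyCharAt c1 (k : Int) = String.ofList [c1.toList[k]] := by
  simp [pyCharAt, List.getElem?_eq_getElem hk]

theorem pyInt_bit (ch : Char) (h : ch = '0' ∨ ch = '1') :
    pyInt (String.ofList [ch]) = if ch = '1' then 1 else 0 := by
  rcases h with rfl | rfl <;> decide

theorem xorWord_toList (c1 c2 : String)
    (hb1 : ∀ ch ∈ c1.toList, ch = '0' ∨ ch = '1')
    (hb2 : ∀ ch ∈ c2.toList, ch = '0' ∨ ch = '1')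
    (hlen : c1.toList.length = c2.toList.length) :
    (xorWord c1 c2).toList = List.zipWith xc c1.toList c2.toList := by
  unfold xorWord
  rw [PySem.Str.len_eq]
  rw [loop_toList]
  have heval : ∀ k ∈ List.range c1.toList.length,
      ((PySem.Int.toStr (PySem.Int.bxor (pyInt (pyCharAt c1 (k : Int))) (pyInt (pyCharAt c2 (k : Int))))).toList)
        = [xc (c1.toList.getD k ' ') (c2.toList.getD k ' ')] := by
    intro k hk
    rw [List.mem_range] at hk
    rw [charAt_eval c1 k hk, charAt_eval c2 k (hlen ▸ hk)]
    rw [pyInt_bit _ (hb1 _ (List.getElem_mem _)), pyInt_bit _ (hb2 _ (List.getElem_mem _))]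
    rw [List.getD_eq_getElem _ _ hk, List.getD_eq_getElem _ _ (hlen ▸ hk)]
    rcases hb1 _ (List.getElem_mem hk) with h1 | h1 <;>
      rcases hb2 _ (List.getElem_mem (hlen ▸ hk)) with h2 | h2 <;>
      rw [h1, h2] <;> simp [xc] <;> decide
  rw [List.map_congr_left heval]
  have hflat : ((List.range c1.toList.length).map
      (fun k => [xc (c1.toList.getD k ' ') (c2.toList.getD k ' ')])).flatten
      = (List.range c1.toList.length).map (fun k => xc (c1.toList.getD k ' ') (c2.toList.getD k ' ')) := by
    generalize List.range c1.toList.length = r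
    induction r with
    | nil => simp
    | cons x t ih =>
      simp only [List.map_cons, List.flatten_cons, List.singleton_append]
      rw [ih]
  rw [hflat]
  apply List.ext_getElem
  · simp [hlen]
  · intro i h1 h2
    have hlen2 : (List.zipWith xc c1.toList c2.toList).length = c1.toList.length := by
      simp [hlen]
    have hi1 : i < c1.toList.length := by omega
    have hi2 : i < c2.toList.length := by omega
    simp only [List.getElem_append, List.getElem_map, List.getElem_range, List.getElem_zipWith,
      String.toList_empty, List.nil_append, List.getD]
    rw [List.getElem?_eq_getElem hi1, List.getElem?_eq_getElem hi2]
    rfl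

-- ---------- the span loop ----------

def ClosedX (T : List Nat) : Prop := ∀ a ∈ T, ∀ b ∈ T, a ^^^ b ∈ T

theorem mem_grow (span : List Nat) (v x : Nat) :
    x ∈ PySem.Set.union span (span.map (fun s => v ^^^ s)) ↔ x ∈ span ∨ ∃ s ∈ span, x = v ^^^ s := by
  rw [PySem.Set.mem_union]
  simp [eq_comm]

theorem grow_fresh (span : List Nat) (v : Nat) (hcl : ClosedX span) (hv : v ∉ span) :
    ∀ x ∈ span.map (fun s => v ^^^ s), x ∉ span := by
  intro x hx hxs
  rcases List.mem_map.1 hx with ⟨s, hs, rfl⟩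
  have h2 : v ^^^ s ^^^ s ∈ span := hcl _ hxs _ hs
  exact hv (by simpa using h2)

theorem nodup_map_xor (span : List Nat) (v : Nat) (h : span.Nodup) :
    (span.map (fun s => v ^^^ s)).Nodup :=
  h.map (fun a b hab => by simpa using congrArg (fun t => v ^^^ t) hab)

theorem length_grow (span : List Nat) (v : Nat) (h : span.Nodup) (hcl : ClosedX span) (hv : v ∉ span) :
    (PySem.Set.union span (span.map (fun s => v ^^^ s))).length = 2 * span.length := by
  show (PySem.Set.update span _).length = _
  rw [PySem.Set.update_eq_append_of_disjoint _ _ (nodup_map_xor span v h) (grow_fresh span v hcl hv)]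
  simp; ring

theorem closed_grow (span : List Nat) (v : Nat) (hcl : ClosedX span) :
    ClosedX (PySem.Set.union span (span.map (fun s => v ^^^ s))) := by
  intro a ha b hb
  rw [mem_grow] at ha hb ⊢
  rcases ha with ha | ⟨s, hs, rfl⟩ <;> rcases hb with hb | ⟨t, ht, rfl⟩
  · exact Or.inl (hcl _ ha _ hb)
  · refine Or.inr ⟨a ^^^ t, hcl _ ha _ ht, ?_⟩
    rw [Nat.xor_comm a (v ^^^ t), Nat.xor_assoc, Nat.xor_comm t a]
  · exact Or.inr ⟨s ^^^ b, hcl _ hs _ hb, by rw [Nat.xor_assoc]⟩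
  · refine Or.inl ?_
    have heq : v ^^^ s ^^^ (v ^^^ t) = s ^^^ t := by
      rw [Nat.xor_comm v s, Nat.xor_assoc]
      simp [← Nat.xor_assoc]
    rw [heq]; exact hcl _ hs _ ht

theorem nodup_grow (span : List Nat) (v : Nat) (h : span.Nodup) :
    (PySem.Set.union span (span.map (fun s => v ^^^ s))).Nodup :=
  PySem.Set.nodup_union _ _ h

theorem mem_grow_self (span : List Nat) (v : Nat) (h0 : 0 ∈ span) :
    v ∈ PySem.Set.union span (span.map (fun s => v ^^^ s)) := by
  rw [mem_grow]
  exact Or.inr ⟨0, h0, by simp⟩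

theorem sub_grow (span : List Nat) (v : Nat) :
    span ⊆ PySem.Set.union span (span.map (fun s => v ^^^ s)) := by
  intro x hx; rw [mem_grow]; exact Or.inl hx

theorem spanLoop_sound (n : Nat) :
    ∀ (rest : List Nat) (span span' : List Nat), span.Nodup → ClosedX span → 0 ∈ span →
    spanLoop n rest span = some span' →
    span'.Nodup ∧ ClosedX span' ∧ 0 ∈ span' ∧ span ⊆ span' ∧ ∀ v ∈ rest, v ∈ span' := by
  intro rest
  induction rest with
  | nil =>
    intro span span' hnd hcl h0 heq
    cases heq
    exact ⟨hnd, hcl, h0, fun _ h => h, by simp⟩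
  | cons v t ih =>
    intro span span' hnd hcl h0 heq
    by_cases hv : v ∈ span
    · rw [spanLoop, if_pos (by simpa [PySem.Set.contains_iff] using hv)] at heq
      obtain ⟨a, b, c, d, e⟩ := ih span span' hnd hcl h0 heq
      refine ⟨a, b, c, d, ?_⟩
      intro x hx
      rcases List.mem_cons.1 hx with rfl | hx2
      · exact d hv
      · exact e _ hx2
    · rw [spanLoop, if_neg (by simpa [PySem.Set.contains_iff] using hv)] at heq
      by_cases hg : 2 * span.length > n
      · rw [if_pos hg] at heq; cases heq
      · rw [if_neg hg] at heq
        obtain ⟨a, b, c, d, e⟩ := ih _ span' (nodup_grow span v hnd) (closed_grow span v hcl)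
          ((mem_grow span v 0).2 (Or.inl h0)) heq
        refine ⟨a, b, c, fun x hx => d (sub_grow span v hx), ?_⟩
        intro x hx
        rcases List.mem_cons.1 hx with rfl | hx
        · exact d (mem_grow_self span x h0)
        · exact e _ hx

theorem spanLoop_complete (V : List Nat) (hVcl : ClosedX V) :
    ∀ (rest : List Nat) (span : List Nat), (∀ x ∈ rest, x ∈ V) → (∀ x ∈ span, x ∈ V) →
    span.Nodup → ClosedX span → 0 ∈ span →
    ∃ span', spanLoop V.length rest span = some span' ∧ ∀ x ∈ span', x ∈ V := by
  intro rest
  induction rest with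
  | nil =>
    intro span _ hs _ _ _
    exact ⟨span, rfl, hs⟩
  | cons v t ih =>
    intro span hr hs hnd hcl h0
    by_cases hv : v ∈ span
    · rw [spanLoop, if_pos (by simpa [PySem.Set.contains_iff] using hv)]
      exact ih span (fun x hx => hr x (by simp [hx])) hs hnd hcl h0
    · rw [spanLoop, if_neg (by simpa [PySem.Set.contains_iff] using hv)]
      have hgsub : ∀ x ∈ PySem.Set.union span (span.map (fun s => v ^^^ s)), x ∈ V := by
        intro x hx
        rcases (mem_grow span v x).1 hx with hx | ⟨s, hsp, rfl⟩
        · exact hs _ hx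
        · exact hVcl _ (hr v (by simp)) _ (hs _ hsp)
      have hlen : (PySem.Set.union span (span.map (fun s => v ^^^ s))).length ≤ V.length :=
        (List.subperm_of_subset (nodup_grow span v hnd) hgsub).length_le
      rw [length_grow span v hnd hcl hv] at hlen
      rw [if_neg (by omega)]
      exact ih _ (fun x hx => hr x (by simp [hx])) hgsub (nodup_grow span v hnd)
        (closed_grow span v hcl) ((mem_grow span v 0).2 (Or.inl h0))

theorem subset_of_nodup_len (V W : List Nat) (hsub : V ⊆ W) (hVnd : V.Nodup) (hWnd : W.Nodup)
    (hlen : W.length = V.length) : ∀ x ∈ W, x ∈ V := by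
  intro x hx
  have h1 : V.toFinset ⊆ W.toFinset := by
    intro y hy
    rw [List.mem_toFinset] at *
    exact hsub hy
  have hcard : W.toFinset.card ≤ V.toFinset.card := by
    rw [List.toFinset_card_of_nodup hVnd, List.toFinset_card_of_nodup hWnd]
    omega
  have h2 := Finset.eq_of_subset_of_card_le h1 hcard
  rw [← List.mem_toFinset, ← h2, List.mem_toFinset] at hx
  exact hx

-- ---------- characterizing the two ports ----------

def zeroishB (c : String) : Bool := (c.toList.count '0' != 0) && (c.toList.count '1' == 0)

theorem uniform_iff (codes : List String) (hne : codes ≠ []) :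
    is_uniform_code codes = true ↔
      ∀ c ∈ codes, c.toList.length = (codes.headD "").toList.length := by
  cases codes with
  | nil => simp at hne
  | cons c0 t =>
    simp only [is_uniform_code]
    have h0 : PySem.List.pyGet? (c0 :: t) 0 = some c0 := by
      simpa using PySem.List.pyGet?_natCast (xs := c0 :: t) (n := 0) (by simp)
    rw [h0]
    simp [List.all_eq_true, PySem.Str.len_eq]

theorem foldl_flag {α : Type} (p : α → Bool) :
    ∀ (l : List α) (acc : Int), (l.foldl (fun a x => if p x then 1 else a) acc)
      = if l.any p then 1 else acc := by
  intro l
  induction l with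
  | nil => simp
  | cons x t ih =>
    intro acc
    by_cases h : p x = true
    · simp [h, ih]
    · rw [Bool.not_eq_true] at h
      simp [h, ih]

theorem check_eq (codes : List String) :
    ((PySem.List.pyRange 0 (PySem.List.len codes)).foldl
      (fun check i =>
        let counter := PySem.Dict.counter ((PySem.List.pyGetD codes i "").toList)
        if counter.getD '0' 0 ≠ 0 ∧ counter.getD '1' 0 = 0 then 1 else check) (0 : Int))
    = if codes.any zeroishB then 1 else 0 := by
  have hstep : (fun (check : Int) (c : String) =>
      (let counter := PySem.Dict.counter c.toList
       if counter.getD '0' 0 ≠ 0 ∧ counter.getD '1' 0 = 0 then (1:Int) else check))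
      = fun check c => if zeroishB c then 1 else check := by
    funext check c
    simp only [PySem.Dict.getD_counter, zeroishB]
    by_cases h1 : c.toList.count '0' = 0 <;> by_cases h2 : c.toList.count '1' = 0 <;>
      simp [h1, h2]
  have hmap := PySem.List.map_pyGetD_pyRange_zero codes ""
  have hfold : ((PySem.List.pyRange 0 (PySem.List.len codes)).foldl
      (fun check i =>
        let counter := PySem.Dict.counter ((PySem.List.pyGetD codes i "").toList)
        if counter.getD '0' 0 ≠ 0 ∧ counter.getD '1' 0 = 0 then 1 else check) (0 : Int))
    = codes.foldl (fun check c =>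
        let counter := PySem.Dict.counter c.toList
        if counter.getD '0' 0 ≠ 0 ∧ counter.getD '1' 0 = 0 then 1 else check) 0 := by
    conv_rhs => rw [← hmap, List.foldl_map]
  rw [hfold, hstep]
  exact foldl_flag zeroishB codes 0

theorem ofList_singleton {α : Type} [BEq α] [LawfulBEq α] (xs : List α) (a : α)
    (hne : xs ≠ []) (hall : ∀ x ∈ xs, x = a) : PySem.Set.ofList xs = [a] := by
  cases xs with
  | nil => simp at hne
  | cons x t =>
    have hx : x = a := hall x (by simp)
    subst hx
    rw [PySem.Set.ofList_cons]
    have : PySem.Set.discard (PySem.Set.ofList t) x = [] := by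
      rw [List.eq_nil_iff_forall_not_mem]
      intro y hy
      rw [PySem.Set.mem_discard] at hy
      exact hy.2 (hall y (by simp [(PySem.Set.mem_ofList t y).1 hy.1]))
    rw [this]

-- ---------- the common mathematical core ----------

theorem main_equiv (codes : List String)
    (hbin : ∀ c ∈ codes, ∀ ch ∈ c.toList, ch = '0' ∨ ch = '1')
    (L : Nat) (hL : 0 < L)
    (huni : ∀ c ∈ codes, c.toList.length = L)
    (h0w : String.ofList (List.replicate L '0') ∈ codes) :
    (codes.all (fun c1 => codes.all (fun c2 =>
        if c1 ≠ c2 then (PySem.Set.ofList codes).contains (xorWord c1 c2) else true)) = true)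
    ↔ ClosedX (PySem.Set.ofList ((PySem.Set.ofList codes).map parseBin)) := by
  set V := PySem.Set.ofList ((PySem.Set.ofList codes).map parseBin) with hV
  have memV : ∀ x, x ∈ V ↔ ∃ c ∈ codes, parseBin c = x := by
    intro x
    rw [hV, PySem.Set.mem_ofList]
    constructor
    · intro hx
      rcases List.mem_map.1 hx with ⟨c, hc, rfl⟩
      exact ⟨c, (PySem.Set.mem_ofList codes c).1 hc, rfl⟩
    · rintro ⟨c, hc, rfl⟩
      exact List.mem_map.2 ⟨c, (PySem.Set.mem_ofList codes c).2 hc, rfl⟩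
  have h0V : 0 ∈ V := by
    rw [memV]
    refine ⟨_, h0w, ?_⟩
    rw [parseBin_eq_pbl]
    simpa using pbl_replicate L
  have hxw : ∀ c1 ∈ codes, ∀ c2 ∈ codes,
      (xorWord c1 c2).toList = List.zipWith xc c1.toList c2.toList ∧
      (∀ ch ∈ (xorWord c1 c2).toList, ch = '0' ∨ ch = '1') ∧
      (xorWord c1 c2).toList.length = L ∧
      parseBin (xorWord c1 c2) = parseBin c1 ^^^ parseBin c2 := by
    intro c1 h1 c2 h2
    have hlen : c1.toList.length = c2.toList.length := by rw [huni c1 h1, huni c2 h2]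
    have htl := xorWord_toList c1 c2 (hbin c1 h1) (hbin c2 h2) hlen
    refine ⟨htl, ?_, ?_, ?_⟩
    · rw [htl]
      intro ch hch
      rcases List.mem_iff_getElem.1 hch with ⟨i, hi, rfl⟩
      simp only [List.getElem_zipWith]
      unfold xc; split
      · exact Or.inl rfl
      · exact Or.inr rfl
    · rw [htl]
      simp [hlen, huni c2 h2]
    · rw [parseBin_eq_pbl, parseBin_eq_pbl, parseBin_eq_pbl, htl]
      exact pbl_zip c1.toList c2.toList hlen (hbin c1 h1) (hbin c2 h2)
  constructor
  · -- pairwise closure ⇒ ClosedX V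
    intro hall a ha b hb
    rw [List.all_eq_true] at hall
    rcases (memV a).1 ha with ⟨c1, h1, rfl⟩
    rcases (memV b).1 hb with ⟨c2, h2, rfl⟩
    by_cases hcc : c1 = c2
    · subst hcc
      simpa using h0V
    · have := hall c1 h1
      rw [List.all_eq_true] at this
      have := this c2 h2
      rw [if_pos hcc] at this
      rw [PySem.Set.contains_iff, PySem.Set.mem_ofList] at this
      rw [memV]
      exact ⟨xorWord c1 c2, this, (hxw c1 h1 c2 h2).2.2.2⟩
  · -- ClosedX V ⇒ pairwise closure
    intro hcl
    rw [List.all_eq_true]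
    intro c1 h1
    rw [List.all_eq_true]
    intro c2 h2
    by_cases hcc : c1 = c2
    · rw [if_neg (by simpa using hcc)]
    · rw [if_pos hcc, PySem.Set.contains_iff, PySem.Set.mem_ofList]
      have hx : parseBin c1 ^^^ parseBin c2 ∈ V :=
        hcl _ ((memV _).2 ⟨c1, h1, rfl⟩) _ ((memV _).2 ⟨c2, h2, rfl⟩)
      rcases (memV _).1 hx with ⟨c3, h3, hp3⟩
      obtain ⟨htl, hbx, hlx, hpx⟩ := hxw c1 h1 c2 h2
      have : (xorWord c1 c2).toList = c3.toList := by
        apply pbl_inj _ _ (by rw [hlx, huni c3 h3]) hbx (hbin c3 h3)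
        rw [← parseBin_eq_pbl, ← parseBin_eq_pbl, hpx, hp3]
      have heq : xorWord c1 c2 = c3 := by
        have h4 := congrArg String.ofList this
        simpa [String.ofList_toList] using h4
      rw [heq]
      exact h3

theorem B_true_iff (V : List Nat) (hVnd : V.Nodup) (h0V : 0 ∈ V) :
    (match spanLoop V.length V (PySem.Set.ofList [0]) with
      | none => false
      | some span => span.length == V.length) = true ↔ ClosedX V := by
  have hinit : PySem.Set.ofList [0] = [0] := rfl
  constructor
  · intro hres
    rcases hloop : spanLoop V.length V (PySem.Set.ofList [0]) with _ | span
    · rw [hloop] at hres; simp at hres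
    · rw [hloop] at hres
      simp only [beq_iff_eq] at hres
      rw [hinit] at hloop
      obtain ⟨hnd, hcl, _, _, hVsub⟩ := spanLoop_sound V.length V [0] span
        (by simp) (by intro a ha b hb; simp_all) (by simp) hloop
      have hmem := subset_of_nodup_len V span (fun x hx => hVsub x hx) hVnd hnd hres
      intro a ha b hb
      exact hmem _ (hcl a (hVsub a ha) b (hVsub b hb))
  · intro hcl
    obtain ⟨span', hloop, hsub⟩ := spanLoop_complete V hcl V [0]
      (fun x hx => hx) (by simpa using h0V) (by simp)
      (by intro a ha b hb; simp_all) (by simp)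
    rw [hinit, hloop]
    obtain ⟨hnd, _, _, _, hVsub⟩ := spanLoop_sound V.length V [0] span'
      (by simp) (by intro a ha b hb; simp_all) (by simp) hloop
    simp only [beq_iff_eq]
    have hle1 := (List.subperm_of_subset hnd hsub).length_le
    have hle2 := (List.subperm_of_subset hVnd (fun x hx => hVsub x hx)).length_le
    omega

-- ---------- assembling the verdict ----------

theorem zeroish_mem (c : String) (h : zeroishB c = true) :
    '0' ∈ c.toList ∧ '1' ∉ c.toList := by
  simp only [zeroishB, Bool.and_eq_true, bne_iff_ne, beq_iff_eq] at h
  constructor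
  · exact List.count_pos_iff.1 (by omega)
  · exact List.count_eq_zero.1 h.2

theorem main_theorem (codes : List String) (hpre : Pre_is_linear_block_code codes) :
    is_linear_block_code codes = is_linear_block_code_alt codes := by
  obtain ⟨hne, hdisjB⟩ := hpre
  have hdisj : (∀ c ∈ codes, ∀ ch ∈ c.toList, ch = '0' ∨ ch = '1')
      ∨ (∃ c ∈ codes, c.toList.length ≠ (codes.headD "").toList.length)
      ∨ (∀ c ∈ codes, ¬('0' ∈ c.toList ∧ '1' ∉ c.toList)) := by
    rcases hdisjB with h | h | h
    · left
      simp only [List.all_eq_true, Bool.or_eq_true, beq_iff_eq] at h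
      exact h
    · right; left
      simp only [List.any_eq_true, bne_iff_ne] at h
      exact h
    · right; right
      intro c hc hcon
      have h2 := List.all_eq_true.1 h c hc
      rw [Bool.not_eq_true'] at h2
      have h3 : c.toList.contains '0' = true := by simpa using hcon.1
      have h4 : c.toList.contains '1' = false := by simpa using hcon.2
      rw [h3, h4] at h2
      simp at h2
  clear hdisjB
  set L := (codes.headD "").toList.length with hLdef
  by_cases huni : ∀ c ∈ codes, c.toList.length = L
  · -- uniform case
    have hubool : is_uniform_code codes = true := (uniform_iff codes hne).2 huni
    have hlengths : PySem.Set.ofList (codes.map (fun c => c.toList.length)) = [L] := by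
      apply ofList_singleton _ _ (by simpa using hne)
      intro x hx
      rcases List.mem_map.1 hx with ⟨c, hc, rfl⟩
      exact huni c hc
    by_cases hz : codes.any zeroishB = true
    · -- a word of '0's free of '1's exists
      obtain ⟨cz, hczm, hczb⟩ := List.any_eq_true.1 hz
      obtain ⟨hz0, hz1⟩ := zeroish_mem cz hczb
      have hLpos : 0 < L := by
        have := huni cz hczm
        have hlen0 : 0 < cz.toList.length := List.length_pos_of_mem hz0
        omega
      have hbin : ∀ c ∈ codes, ∀ ch ∈ c.toList, ch = '0' ∨ ch = '1' := by
        rcases hdisj with h | h | h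
        · exact h
        · exact absurd (huni _ h.choose_spec.1) h.choose_spec.2
        · exact absurd ⟨hz0, hz1⟩ (h cz hczm)
      have h0w : String.ofList (List.replicate L '0') ∈ codes := by
        have hrep : cz.toList = List.replicate L '0' := by
          rw [List.eq_replicate_iff]
          refine ⟨huni cz hczm, ?_⟩
          intro b hb
          rcases hbin cz hczm b hb with rfl | rfl
          · rfl
          · exact absurd hb hz1
        have hcz : cz = String.ofList (List.replicate L '0') := by
          have h5 := congrArg String.ofList hrep
          rwa [String.ofList_toList] at h5
        exact hcz ▸ hczm
      have h0V : (0:Nat) ∈ PySem.Set.ofList ((PySem.Set.ofList codes).map parseBin) := by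
        rw [PySem.Set.mem_ofList]
        refine List.mem_map.2 ⟨String.ofList (List.replicate L '0'),
          (PySem.Set.mem_ofList codes _).2 h0w, ?_⟩
        rw [parseBin_eq_pbl]
        simpa using pbl_replicate L
      have hA : is_linear_block_code codes =
          codes.all (fun c1 => codes.all (fun c2 =>
            if c1 ≠ c2 then (PySem.Set.ofList codes).contains (xorWord c1 c2) else true)) := by
        simp only [is_linear_block_code, hubool, Bool.not_true, Bool.false_eq_true, if_false,
          check_eq, hz, if_true]
        norm_num
      have hB : is_linear_block_code_alt codes =
          (match spanLoop (PySem.Set.ofList ((PySem.Set.ofList codes).map parseBin)).length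
              (PySem.Set.ofList ((PySem.Set.ofList codes).map parseBin)) (PySem.Set.ofList [0]) with
            | none => false
            | some span => span.length == (PySem.Set.ofList ((PySem.Set.ofList codes).map parseBin)).length) := by
        simp only [is_linear_block_code_alt, hlengths]
        rw [if_neg (by simp)]
        simp only [List.headD_cons]
        rw [if_neg (by
          have hct : (PySem.Set.ofList codes).contains (String.ofList (List.replicate L '0')) = true := by
            rw [PySem.Set.contains_iff, PySem.Set.mem_ofList]
            exact h0w
          simp only [hct, Bool.not_true, Bool.or_false, Bool.or_eq_true, beq_iff_eq]
          omega)]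
      rw [hA, hB]
      have h1 := main_equiv codes hbin L hLpos huni h0w
      have h2 := B_true_iff (PySem.Set.ofList ((PySem.Set.ofList codes).map parseBin))
        (PySem.Set.nodup_ofList _) h0V
      have h3 := h1.trans h2.symm
      exact Bool.coe_iff_coe.mp h3
    · -- no zeroish word: both sides are False
      have hA : is_linear_block_code codes = false := by
        rw [Bool.not_eq_true] at hz
        simp only [is_linear_block_code, hubool, Bool.not_true, Bool.false_eq_true, if_false,
          check_eq, hz]
        norm_num
      have hB : is_linear_block_code_alt codes = false := by
        simp only [is_linear_block_code_alt, hlengths]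
        rw [if_neg (by simp)]
        simp only [List.headD_cons]
        rw [if_pos ?_]
        by_cases hL0 : L = 0
        · simp [hL0]
        · have hnw : String.ofList (List.replicate L '0') ∉ codes := by
            intro hmem
            apply hz ∘ Eq.mpr (congrArg (· = true) rfl)
            refine List.any_eq_true.2 ⟨_, hmem, ?_⟩
            simp [zeroishB, List.count_replicate]
            omega
          simp only [Bool.or_eq_true, beq_iff_eq, Bool.not_eq_true']
          right
          rw [Bool.eq_false_iff]
          intro hc
          rw [PySem.Set.contains_iff, PySem.Set.mem_ofList] at hc
          exact hnw hc
      rw [hA, hB]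
  · -- non-uniform case: both sides are False
    have hubool : is_uniform_code codes = false := by
      rw [← Bool.not_eq_true, uniform_iff codes hne]
      exact huni
    have hA : is_linear_block_code codes = false := by
      simp [is_linear_block_code, hubool]
    have hB : is_linear_block_code_alt codes = false := by
      simp only [is_linear_block_code_alt]
      rw [if_pos]
      intro hone
      rcases List.length_eq_one_iff.1 hone with ⟨a, ha⟩
      apply huni
      intro c hc
      have hmem : ∀ x ∈ codes.map (fun c => c.toList.length), x = a := by
        intro x hx
        have hx2 := (PySem.Set.mem_ofList _ x).2 hx
        rw [ha] at hx2
        simpa using hx2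
      have h1 : c.toList.length = a := hmem _ (List.mem_map.2 ⟨c, hc, rfl⟩)
      have h2 : L = a := by
        apply hmem
        apply List.mem_map.2
        refine ⟨codes.headD "", ?_, rfl⟩
        cases codes with
        | nil => simp at hne
        | cons x t => simp
      rw [h1, h2]
    rw [hA, hB]

-- ===== VERDICT (by name: the statement is the Claim_ definition above) =====
theorem is_linear_block_code_spec : Claim_equal_is_linear_block_code := by
  intro codes _ hpre
  unfold Spec_is_linear_block_code
  exact main_theorem codes hpre
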